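-- pv_equiv track=rewrite | github.com/matthieuCantat/python | script/rotateBB_getOrientPosition.py | array_flatTo3by3
-- ===== SOURCE A (Python) =====
-- def array_flatTo3by3( flatArray ):
--
-- 	array3by3 = []
-- 	tmp       = []
--
-- 	for e in flatArray:
-- 		tmp.append( e )
-- 		if( len( tmp ) == 3 ):
-- 			array3by3.append( tmp )
-- 			tmp = []
--
-- 	return array3by3
-- ===== SOURCE B (Python) =====
-- def array_flatTo3by3(flatArray):
--     n = len(flatArray)
--     return [flatArray[i:i + 3] for i in range(0, n - n % 3, 3)]
-- ===== Notes on version B (the rewrite author's own statement) =====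
-- stated objective: idiomatic
-- what changed: Replaces the element-by-element buffer-and-flush loop by a slice comprehension over start indices 0,3,6,... up to n - n%3, so the trailing incomplete group is dropped by the range bound instead of by leftover buffer state.
import Mathlib
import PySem

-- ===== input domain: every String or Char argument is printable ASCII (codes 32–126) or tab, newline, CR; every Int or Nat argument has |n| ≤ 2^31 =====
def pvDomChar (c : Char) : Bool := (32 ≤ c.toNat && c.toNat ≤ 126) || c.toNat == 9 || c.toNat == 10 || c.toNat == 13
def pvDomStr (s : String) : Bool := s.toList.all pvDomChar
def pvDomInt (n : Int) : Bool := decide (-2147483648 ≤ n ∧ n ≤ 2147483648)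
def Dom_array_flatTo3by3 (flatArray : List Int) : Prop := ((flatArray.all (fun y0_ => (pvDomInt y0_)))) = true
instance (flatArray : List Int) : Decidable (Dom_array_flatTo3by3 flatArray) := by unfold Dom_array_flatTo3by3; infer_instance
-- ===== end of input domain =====

-- B replaces A's buffer-and-flush loop by a slice comprehension over start indices stepping by 3 (objective: idiomatic); equal cost.


-- ===== PORT A =====
def array_flatTo3by3 (flatArray : List Int) : List (List Int) :=
  (flatArray.foldl
    (fun (st : List (List Int) × List Int) e =>
      let tmp := st.2 ++ [e]
      if tmp.length == 3 then (st.1 ++ [tmp], ([] : List Int)) else (st.1, tmp))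
    ([], [])).1

-- ===== PORT B =====
def array_flatTo3by3_alt (flatArray : List Int) : List (List Int) :=
  let n : Int := flatArray.length
  (PySem.List.pyRange 0 (n - PySem.Int.mod n 3) 3).map
    (fun i => PySem.List.slice flatArray (some i) (some (i + 3)))

-- ===== PRECONDITION & SPEC =====
def Spec_array_flatTo3by3 (flatArray : List Int) (out : List (List Int)) : Prop := out = array_flatTo3by3_alt flatArray
instance (flatArray : List Int) (out : List (List Int)) : Decidable (Spec_array_flatTo3by3 flatArray out) := by unfold Spec_array_flatTo3by3; infer_instance

-- ===== CLAIM (what is proved, stated in full; the proofs are below) =====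
def Claim_equal_array_flatTo3by3 : Prop := ∀ (flatArray : List Int), Dom_array_flatTo3by3 flatArray → Spec_array_flatTo3by3 flatArray (array_flatTo3by3 flatArray)

-- ===== LEMMAS AND PROOFS =====

-- proof-side characterisation: take three, recurse
def chunk3 : List Int → List (List Int)
  | a :: b :: c :: rest => [a, b, c] :: chunk3 rest
  | _ => []

lemma alt_closed (xs : List Int) :
    array_flatTo3by3_alt xs
      = (List.range (xs.length / 3)).map (fun k => (xs.drop (3 * k)).take 3) := by
  simp only [array_flatTo3by3_alt]
  rw [PySem.List.pyRange_of_pos 0 _ (by norm_num), List.map_map]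
  have hcount :
      (if (0 : Int) < (xs.length : Int) - PySem.Int.mod (xs.length : Int) 3
        then (((xs.length : Int) - PySem.Int.mod (xs.length : Int) 3 - 0 + 3 - 1) / 3).toNat
        else 0) = xs.length / 3 := by
    have hm : PySem.Int.mod ((xs.length : Int)) 3 = (xs.length : Int) % 3 := by
      simp [PySem.Int.mod, Int.fmod_eq_emod]
    rw [hm]
    by_cases hpos : (0 : Int) < (xs.length : Int) - (xs.length : Int) % 3
    · rw [if_pos hpos]; omega
    · rw [if_neg hpos]; omega
  rw [hcount]
  refine List.map_congr_left (fun k _ => ?_)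
  simp only [Function.comp]
  rw [PySem.List.slice_toNat xs (by positivity) (by positivity)]
  have e1 : ((0 : Int) + 3 * (k : Int)).toNat = 3 * k := by omega
  have e2 : ((0 : Int) + 3 * (k : Int) + 3).toNat = 3 * k + 3 := by omega
  rw [e1, e2]
  simp

lemma closed_eq_chunk3 (xs : List Int) :
    (List.range (xs.length / 3)).map (fun k => (xs.drop (3 * k)).take 3) = chunk3 xs := by
  induction xs using chunk3.induct with
  | case1 a b c rest ih =>
    have hlen : (a :: b :: c :: rest).length / 3 = rest.length / 3 + 1 := by
      simp; omega
    rw [hlen, List.range_succ_eq_map, List.map_cons, List.map_map, chunk3]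
    refine congrArg₂ _ (by simp) ?_
    rw [← ih]
    refine List.map_congr_left (fun k _ => ?_)
    simp [Function.comp, show 3 * (k + 1) = 3 * k + 1 + 1 + 1 from by ring,
      List.drop_succ_cons]
  | case2 xs h =>
    match xs, h with
    | [], _ => simp [chunk3]
    | [a], _ => simp [chunk3]
    | [a, b], _ => simp [chunk3]
    | a :: b :: c :: rest, h => exact (h a b c rest rfl).elim

lemma loopA_eq (xs : List Int) : ∀ (acc : List (List Int)),
    (xs.foldl
      (fun (st : List (List Int) × List Int) e =>
        let tmp := st.2 ++ [e]
        if tmp.length == 3 then (st.1 ++ [tmp], ([] : List Int)) else (st.1, tmp))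
      (acc, [])).1 = acc ++ chunk3 xs := by
  induction xs using chunk3.induct with
  | case1 a b c rest ih =>
    intro acc
    have h3 : (List.foldl
        (fun (st : List (List Int) × List Int) e =>
          let tmp := st.2 ++ [e]
          if tmp.length == 3 then (st.1 ++ [tmp], ([] : List Int)) else (st.1, tmp))
        (acc, []) [a, b, c]) = (acc ++ [[a, b, c]], []) := by
      simp [List.foldl]
    rw [show a :: b :: c :: rest = [a, b, c] ++ rest from rfl, List.foldl_append, h3,
      ih (acc ++ [[a, b, c]])]
    simp [chunk3]
  | case2 xs h =>
    match xs, h with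
    | [], _ => intro acc; simp [chunk3]
    | [a], _ => intro acc; simp [chunk3, List.foldl]
    | [a, b], _ => intro acc; simp [chunk3, List.foldl]
    | a :: b :: c :: rest, h => exact (h a b c rest rfl).elim

-- ===== VERDICT (by name: the statement is the Claim_ definition above) =====
theorem array_flatTo3by3_spec : Claim_equal_array_flatTo3by3 := by
  intro flatArray _
  unfold Spec_array_flatTo3by3 array_flatTo3by3
  rw [alt_closed, closed_eq_chunk3]
  simpa using loopA_eq flatArray []
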